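-- pv_equiv track=rewrite | github.com/dev-joeysos/Baekjoon | 프로그래머스/unrated/181829. 이차원 배열 대각선 순회하기/이차원 배열 대각선 순회하기.py | solution
-- ===== SOURCE A (Python) =====
-- def solution(board, k):
--     rst = 0
--
--     for i in range(len(board)):
--         for j in range(len(board[i])):
--             v = i+j
--             if v > k:
--                 continue
--             rst += board[i][j]
--     return rst
-- ===== SOURCE B (Python) =====
-- def solution(board, k):
--     # Diagonal traversal: walk anti-diagonals d = i + j from 0 up to min(k, hi),
--     # where hi is the largest diagonal index present in the board.
--     hi = -1
--     for i, row in enumerate(board):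
--         hi = max(hi, i + len(row) - 1)
--     total = 0
--     for d in range(min(k, hi) + 1):
--         for i, row in enumerate(board):
--             j = d - i
--             if 0 <= j < len(row):
--                 total += row[j]
--     return total
-- ===== Notes on version B (the rewrite author's own statement) =====
-- stated objective: alternative
-- what changed: Traverses the board by anti-diagonals d = i+j from 0 to min(k, max diagonal), indexing board[i][d-i], instead of row-major iteration with a per-cell i+j>k guard.
import Mathlib
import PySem

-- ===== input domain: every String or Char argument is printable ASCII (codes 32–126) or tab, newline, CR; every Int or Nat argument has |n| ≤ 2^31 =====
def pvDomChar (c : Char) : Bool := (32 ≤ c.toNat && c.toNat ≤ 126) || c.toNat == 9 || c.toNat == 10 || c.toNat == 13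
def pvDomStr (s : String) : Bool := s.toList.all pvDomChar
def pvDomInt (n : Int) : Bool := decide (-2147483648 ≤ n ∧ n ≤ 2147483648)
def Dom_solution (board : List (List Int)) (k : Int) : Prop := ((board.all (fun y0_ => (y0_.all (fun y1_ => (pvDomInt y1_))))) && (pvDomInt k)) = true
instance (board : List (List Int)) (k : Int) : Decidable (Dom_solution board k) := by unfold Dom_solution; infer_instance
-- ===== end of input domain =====

-- B traverses the board by anti-diagonals d = i+j up to min(k, max diagonal) instead of row-major cells with a per-cell guard (alternative algorithm, same exact result).


-- ===== PORT A =====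
def solution (board : List (List Int)) (k : Int) : Int :=
  (PySem.List.pyRange 0 board.length 1).foldl (fun rst i =>
    let row := PySem.List.pyGetD board i []
    (PySem.List.pyRange 0 row.length 1).foldl (fun rst j =>
      let v := i + j
      if v > k then rst
      else rst + PySem.List.pyGetD row j 0) rst) 0

-- ===== PORT B =====
def solution_alt (board : List (List Int)) (k : Int) : Int :=
  let hi := (PySem.List.enumerate board 0).foldl (fun h p => max h (p.1 + (p.2.length : Int) - 1)) (-1)
  (PySem.List.pyRange 0 (min k hi + 1) 1).foldl (fun total d =>
    (PySem.List.enumerate board 0).foldl (fun total p =>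
      let j := d - p.1
      if 0 ≤ j ∧ j < (p.2.length : Int) then total + PySem.List.pyGetD p.2 j 0
      else total) total) 0

-- ===== PRECONDITION & SPEC =====
def Spec_solution (board : List (List Int)) (k : Int) (out : Int) : Prop := out = solution_alt board k
instance (board : List (List Int)) (k : Int) (out : Int) : Decidable (Spec_solution board k out) := by unfold Spec_solution; infer_instance

-- ===== CLAIM (what is proved, stated in full; the proofs are below) =====
def Claim_equal_solution : Prop := ∀ (board : List (List Int)) (k : Int), Dom_solution board k → Spec_solution board k (solution board k)

-- ===== LEMMAS AND PROOFS =====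

-- a guarded prefix sum over range L equals the sum over the clamped prefix range
lemma ite_lt_sum (g : Nat → Int) (L c : Nat) :
    ∑ j ∈ Finset.range L, (if j < c then g j else 0) = ∑ j ∈ Finset.range (min L c), g j := by
  induction L with
  | zero => simp
  | succ L ih =>
    rw [Finset.sum_range_succ, ih]
    by_cases h : L < c
    · have h1 : min (L + 1) c = min L c + 1 := by omega
      have h2 : min L c = L := by omega
      rw [if_pos h, h1, Finset.sum_range_succ, h2]
    · have h1 : min (L + 1) c = min L c := by omega
      rw [if_neg h, h1, add_zero]

-- one row's contribution along the diagonals: reindex d ↦ j = d - i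
lemma diag_sum (row : List Int) (i D : Nat) :
    ∑ d ∈ Finset.range D, (if i ≤ d ∧ d - i < row.length then row.getD (d - i) 0 else 0)
      = ∑ j ∈ Finset.range (min row.length (D - i)), row.getD j 0 := by
  induction D with
  | zero => simp
  | succ D ih =>
    rw [Finset.sum_range_succ, ih]
    by_cases h : i ≤ D ∧ D - i < row.length
    · have h1 : min row.length (D + 1 - i) = min row.length (D - i) + 1 := by omega
      have h2 : min row.length (D - i) = D - i := by omega
      rw [if_pos h, h1, Finset.sum_range_succ, h2]
    · have h1 : min row.length (D + 1 - i) = min row.length (D - i) := by omega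
      rw [if_neg h, h1, add_zero]

-- list-sum over range = Finset-sum over range (definitional)
lemma sum_map_range (g : Nat → Int) (n : Nat) :
    (List.map g (List.range n)).sum = ∑ j ∈ Finset.range n, g j := rfl

-- A's inner loop over one row: accumulator plus a clamped prefix sum
lemma a_inner (row : List Int) (i : Nat) (k acc : Int) :
    (PySem.List.pyRange 0 row.length 1).foldl
      (fun rst j => if (i : Int) + j > k then rst else rst + PySem.List.pyGetD row j 0) acc
    = acc + ∑ j ∈ Finset.range (min row.length ((k - i + 1).toNat)), row.getD j 0 := by
  have hf : (fun (rst : Int) (j : Int) => if (i : Int) + j > k then rst else rst + PySem.List.pyGetD row j 0)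
      = fun rst j => rst + (if (i : Int) + j > k then 0 else PySem.List.pyGetD row j 0) := by
    funext rst j; split_ifs <;> simp
  rw [hf, PySem.List.foldl_add, PySem.List.pyRange_one]
  simp only [List.map_map, zero_add, Int.sub_zero, Int.toNat_natCast]
  have hg : ((fun j => if (i : Int) + j > k then 0 else PySem.List.pyGetD row j 0) ∘ fun (t : Nat) => (t : Int))
      = fun (j : Nat) => if j < (k - (i : Int) + 1).toNat then row.getD j 0 else 0 := by
    funext j
    simp only [Function.comp, PySem.List.pyGetD_natCast]
    split_ifs with h1 h2 <;> first | rfl | omega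
  rw [hg, sum_map_range, ite_lt_sum]

-- B's inner loop (over all rows, fixed diagonal d): accumulator plus the diagonal's cells
lemma b_inner (board : List (List Int)) (d : Nat) (acc : Int) :
    (PySem.List.enumerate board 0).foldl (fun total p =>
        if 0 ≤ (d : Int) - p.1 ∧ (d : Int) - p.1 < (p.2.length : Int)
        then total + PySem.List.pyGetD p.2 ((d : Int) - p.1) 0 else total) acc
    = acc + ∑ i ∈ Finset.range board.length,
        (if i ≤ d ∧ d - i < (board.getD i []).length then (board.getD i []).getD (d - i) 0 else 0) := by
  rw [PySem.List.enumerate_eq_map_pyRange board ([] : List Int), List.foldl_map,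
      PySem.List.pyRange_one]
  simp only [zero_add, Int.sub_zero, PySem.List.len, Int.toNat_natCast, List.foldl_map]
  have hf : (fun (total : Int) (t : Nat) =>
        if 0 ≤ (d : Int) - (t : Int) ∧ (d : Int) - (t : Int) < ((PySem.List.pyGetD board (t : Int) ([] : List Int)).length : Int)
        then total + PySem.List.pyGetD (PySem.List.pyGetD board (t : Int) ([] : List Int)) ((d : Int) - (t : Int)) 0 else total)
      = fun total t => total +
        (if t ≤ d ∧ d - t < (board.getD t []).length then (board.getD t []).getD (d - t) 0 else 0) := by
    funext total t
    simp only [PySem.List.pyGetD_natCast]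
    split_ifs with h1 h2
    · have hc : ((d : Int) - (t : Int)) = ((d - t : Nat) : Int) := by omega
      rw [hc, PySem.List.pyGetD_natCast]
    · exact absurd ⟨by omega, by omega⟩ h2
    · exact absurd ⟨by omega, by omega⟩ h1
    · simp
  rw [hf, PySem.List.foldl_add, sum_map_range]

-- clamped diagonal count vs clamped column bound: equal under the hi bound
lemma min_eq_clamp (L i : Nat) (k a : Int) (hb : (i : Int) + (L : Int) - 1 ≤ a) :
    min L ((min k a + 1).toNat - i) = min L ((k - (i : Int) + 1).toNat) := by omega

-- the running max hi bounds every diagonal index present in the board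
lemma hi_ge (board : List (List Int)) (i : Nat) (h : i < board.length) :
    (i : Int) + ((board.getD i []).length : Int) - 1
      ≤ (PySem.List.enumerate board 0).foldl (fun h p => max h (p.1 + (p.2.length : Int) - 1)) (-1) := by
  have hmem : ((i : Int), board.getD i []) ∈ PySem.List.enumerate board 0 := by
    rw [PySem.List.mem_enumerate_iff]
    exact ⟨i, h, by rw [zero_add, List.getD_eq_getElem board [] h]⟩
  exact (PySem.List.le_foldl_max_int (PySem.List.enumerate board 0)
    (fun p => p.1 + (p.2.length : Int) - 1) (-1)).2 _ hmem

-- ===== VERDICT (by name: the statement is the Claim_ definition above) =====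
theorem solution_spec : Claim_equal_solution := by
  intro board k _
  unfold Spec_solution solution solution_alt
  -- A side: row-wise clamped prefix sums
  rw [PySem.List.pyRange_one 0 (board.length : Int)]
  simp only [List.foldl_map, zero_add, Int.sub_zero, Int.toNat_natCast]
  have hA : (fun (rst : Int) (t : Nat) =>
        (PySem.List.pyRange 0 ((PySem.List.pyGetD board (t : Int) ([] : List Int)).length : Int) 1).foldl
          (fun rst j => if (t : Int) + j > k then rst else rst + PySem.List.pyGetD (PySem.List.pyGetD board (t : Int) ([] : List Int)) j 0) rst)
      = fun rst t => rst + ∑ j ∈ Finset.range (min (board.getD t []).length ((k - t + 1).toNat)), (board.getD t []).getD j 0 := by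
    funext rst t
    simpa only [PySem.List.pyGetD_natCast] using a_inner (board.getD t []) t k rst
  rw [hA, PySem.List.foldl_add, sum_map_range, zero_add]
  -- B side: diagonal-wise sums, then swap the two sums
  rw [PySem.List.pyRange_one]
  simp only [List.foldl_map, zero_add, Int.sub_zero]
  have hB : (fun (total : Int) (d : Nat) =>
        (PySem.List.enumerate board 0).foldl (fun total p =>
          if 0 ≤ (d : Int) - p.1 ∧ (d : Int) - p.1 < (p.2.length : Int)
          then total + PySem.List.pyGetD p.2 ((d : Int) - p.1) 0 else total) total)
      = fun total d => total + ∑ i ∈ Finset.range board.length,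
          (if i ≤ d ∧ d - i < (board.getD i []).length then (board.getD i []).getD (d - i) 0 else 0) := by
    funext total d
    exact b_inner board d total
  rw [hB, PySem.List.foldl_add, sum_map_range, zero_add, Finset.sum_comm]
  -- per-row: the diagonal slice equals the clamped prefix
  refine Finset.sum_congr rfl (fun i hi' => ?_)
  rw [diag_sum]
  exact congrArg (fun n => ∑ j ∈ Finset.range n, (board.getD i []).getD j 0) (min_eq_clamp _ i k _ (hi_ge board i (Finset.mem_range.mp hi'))).symm
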